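-- pv_equiv track=rewrite | github.com/aziz13-coder/voxbackend4 | vox-stella-publication/backend/question_analyzer.py | _detect_natural_significator
-- ===== SOURCE A (Python) =====
-- from typing import Dict, Any, List
--
-- def _detect_natural_significator(question_lower: str) -> Dict:
--     """Detect natural significators based on traditional horary assignments"""
--
--     # Traditional Natural Significators (from Lilly, Bonatti, etc.)
--     natural_significators = {
--         # Vehicles & Transportation
--         "vehicles": {
--             "keywords": ["car", "vehicle", "automobile", "truck", "motorcycle", "bike"],
--             "significator": "sun",  # Sun = valuable possessions, status symbols
--             "category": "vehicle"
--         },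
--
--         # Real Estate
--         "real_estate": {
--             "keywords": ["house", "home", "property", "building", "land", "estate"],
--             "significator": "moon",  # Moon = home, real estate (4th house connection)
--             "category": "property"
--         },
--
--         # Precious Items
--         "precious_items": {
--             "keywords": ["jewelry", "gold", "silver", "diamond", "ring", "watch", "precious"],
--             "significator": "venus",  # Venus = luxury items, beauty, value
--             "category": "precious"
--         },
--
--         # Technology
--         "technology": {
--             "keywords": ["computer", "phone", "laptop", "electronics", "device", "gadget"],
--             "significator": "mercury",  # Mercury = communication, technology
--             "category": "technology"
--         },
--
--         # Livestock & Animals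
--         "livestock": {
--             "keywords": ["horse", "cattle", "cow", "livestock", "animal"],
--             "significator": "mars",  # Mars = large animals (traditional)
--             "category": "livestock"
--         },
--
--         # Boats & Ships
--         "maritime": {
--             "keywords": ["boat", "ship", "yacht", "vessel"],
--             "significator": "moon",  # Moon = water-related items
--             "category": "maritime"
--         }
--     }
--
--     # Detect which category matches
--     for category, info in natural_significators.items():
--         if any(keyword in question_lower for keyword in info["keywords"]):
--             item_name = next(keyword for keyword in info["keywords"] if keyword in question_lower)
--             return {
--                 item_name: info["significator"],
--                 "category": info["category"],
--                 "traditional_source": "Based on classical horary significator assignments"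
--             }
--
--     return None
-- ===== SOURCE B (Python) =====
-- # B: text-driven scan — sweep over the question's positions collecting the set of
-- # keywords that occur anywhere, then one priority lookup in the ordered table
-- # (alternative: the outer loop runs over the text, not over the keyword table).
--
-- _TABLE = [
--     ("car", "sun", "vehicle"), ("vehicle", "sun", "vehicle"), ("automobile", "sun", "vehicle"),
--     ("truck", "sun", "vehicle"), ("motorcycle", "sun", "vehicle"), ("bike", "sun", "vehicle"),
--     ("house", "moon", "property"), ("home", "moon", "property"), ("property", "moon", "property"),
--     ("building", "moon", "property"), ("land", "moon", "property"), ("estate", "moon", "property"),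
--     ("jewelry", "venus", "precious"), ("gold", "venus", "precious"), ("silver", "venus", "precious"),
--     ("diamond", "venus", "precious"), ("ring", "venus", "precious"), ("watch", "venus", "precious"),
--     ("precious", "venus", "precious"),
--     ("computer", "mercury", "technology"), ("phone", "mercury", "technology"),
--     ("laptop", "mercury", "technology"), ("electronics", "mercury", "technology"),
--     ("device", "mercury", "technology"), ("gadget", "mercury", "technology"),
--     ("horse", "mars", "livestock"), ("cattle", "mars", "livestock"), ("cow", "mars", "livestock"),
--     ("livestock", "mars", "livestock"), ("animal", "mars", "livestock"),
--     ("boat", "moon", "maritime"), ("ship", "moon", "maritime"),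
--     ("yacht", "moon", "maritime"), ("vessel", "moon", "maritime"),
-- ]
--
-- def _detect_natural_significator(question_lower: str):
--     # pass 1: walk the text once; at each position record every keyword starting there
--     found = set()
--     for i in range(len(question_lower)):
--         for kw, _sig, _cat in _TABLE:
--             if question_lower.startswith(kw, i):
--                 found.add(kw)
--     # pass 2: first table entry whose keyword occurred wins (table order = priority)
--     for kw, sig, cat in _TABLE:
--         if kw in found:
--             return {
--                 kw: sig,
--                 "category": cat,
--                 "traditional_source": "Based on classical horary significator assignments",
--             }
--     return None
-- ===== Notes on version B (the rewrite author's own statement) =====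
-- stated objective: alternative
-- what changed: A iterates the keyword table and runs a substring test per keyword (an any() guard then a next() re-scan of the matching category); B inverts the traversal: it sweeps over the question character positions once, collecting into a set every keyword that starts at some position, then does one priority lookup of the first table entry whose keyword was found.
import Mathlib
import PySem

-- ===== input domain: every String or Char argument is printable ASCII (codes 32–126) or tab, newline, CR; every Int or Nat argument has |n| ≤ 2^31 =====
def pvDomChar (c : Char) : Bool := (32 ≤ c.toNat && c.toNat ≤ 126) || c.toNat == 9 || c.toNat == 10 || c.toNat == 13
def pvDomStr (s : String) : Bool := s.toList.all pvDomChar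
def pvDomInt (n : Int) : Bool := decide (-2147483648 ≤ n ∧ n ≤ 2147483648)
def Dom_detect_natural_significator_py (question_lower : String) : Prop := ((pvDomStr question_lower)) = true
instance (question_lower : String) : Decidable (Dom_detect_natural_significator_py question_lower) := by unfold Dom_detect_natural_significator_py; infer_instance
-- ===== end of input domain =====

-- B inverts the traversal: instead of A's loop over the keyword table with a substring
-- test per keyword, B sweeps the question's positions once collecting the set of keywords
-- that start somewhere, then does one priority lookup in the ordered table (alternative).

-- ===== PORT A =====
-- the natural_significators dict, in insertion order: (category key, (keywords, significator, category))
def pvA_significators : List (String × (List String × String × String)) :=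
  [ ("vehicles", (["car", "vehicle", "automobile", "truck", "motorcycle", "bike"], "sun", "vehicle")),
    ("real_estate", (["house", "home", "property", "building", "land", "estate"], "moon", "property")),
    ("precious_items", (["jewelry", "gold", "silver", "diamond", "ring", "watch", "precious"], "venus", "precious")),
    ("technology", (["computer", "phone", "laptop", "electronics", "device", "gadget"], "mercury", "technology")),
    ("livestock", (["horse", "cattle", "cow", "livestock", "animal"], "mars", "livestock")),
    ("maritime", (["boat", "ship", "yacht", "vessel"], "moon", "maritime")) ]

-- the 'for category, info in …' loop: any(kw in q) then next(kw for kw in … if kw in q)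
def pvA_loop (q : String) : List (String × (List String × String × String)) → Option (List (String × String))
  | [] => none
  | (_, (kws, sig, cat)) :: rest =>
      if kws.any (fun kw => PySem.Str.isIn kw q) then
        match kws.find? (fun kw => PySem.Str.isIn kw q) with
        | some item_name =>
            some [(item_name, sig), ("category", cat),
                  ("traditional_source", "Based on classical horary significator assignments")]
        | none => none   -- unreachable: guarded by the any(…)
      else pvA_loop q rest

def detect_natural_significator_py (question_lower : String) : Option (List (String × String)) :=
  pvA_loop question_lower pvA_significators

-- ===== PORT B =====
-- Source B's flat ordered table _TABLE: (keyword, significator, category)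
def pvB_table : List (String × String × String) :=
  [ ("car", "sun", "vehicle"), ("vehicle", "sun", "vehicle"), ("automobile", "sun", "vehicle"),
    ("truck", "sun", "vehicle"), ("motorcycle", "sun", "vehicle"), ("bike", "sun", "vehicle"),
    ("house", "moon", "property"), ("home", "moon", "property"), ("property", "moon", "property"),
    ("building", "moon", "property"), ("land", "moon", "property"), ("estate", "moon", "property"),
    ("jewelry", "venus", "precious"), ("gold", "venus", "precious"), ("silver", "venus", "precious"),
    ("diamond", "venus", "precious"), ("ring", "venus", "precious"), ("watch", "venus", "precious"),
    ("precious", "venus", "precious"),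
    ("computer", "mercury", "technology"), ("phone", "mercury", "technology"),
    ("laptop", "mercury", "technology"), ("electronics", "mercury", "technology"),
    ("device", "mercury", "technology"), ("gadget", "mercury", "technology"),
    ("horse", "mars", "livestock"), ("cattle", "mars", "livestock"), ("cow", "mars", "livestock"),
    ("livestock", "mars", "livestock"), ("animal", "mars", "livestock"),
    ("boat", "moon", "maritime"), ("ship", "moon", "maritime"),
    ("yacht", "moon", "maritime"), ("vessel", "moon", "maritime") ]

-- pass 1 of Source B: 'for i in range(len(q)): for kw,_,_ in _TABLE: if q.startswith(kw, i): found.add(kw)'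
-- (q.startswith(kw, i) with no end bound is exact as Chars.startswith on q.toList.drop i)
def pvB_found (q : List Char) : PySem.Set String :=
  (List.range q.length).foldl
    (fun acc i =>
      pvB_table.foldl
        (fun acc e =>
          if PySem.Chars.startswith (q.drop i) e.1.toList then PySem.Set.add acc e.1 else acc)
        acc)
    PySem.Set.empty

-- pass 2 of Source B: first table entry whose keyword is in the found set
def detect_natural_significator_py_alt (question_lower : String) : Option (List (String × String)) :=
  match pvB_table.find? (fun e => PySem.Set.contains (pvB_found question_lower.toList) e.1) with
  | some (kw, sig, cat) =>
      some [(kw, sig), ("category", cat),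
            ("traditional_source", "Based on classical horary significator assignments")]
  | none => none

-- ===== PRECONDITION & SPEC =====
def Spec_detect_natural_significator_py (question_lower : String) (out : Option (List (String × String))) : Prop := out = detect_natural_significator_py_alt question_lower
instance (question_lower : String) (out : Option (List (String × String))) : Decidable (Spec_detect_natural_significator_py question_lower out) := by unfold Spec_detect_natural_significator_py; infer_instance

-- ===== CLAIM (what is proved, stated in full; the proofs are below) =====
def Claim_equal_detect_natural_significator_py : Prop := ∀ (question_lower : String), Dom_detect_natural_significator_py question_lower → Spec_detect_natural_significator_py question_lower (detect_natural_significator_py question_lower)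

-- ===== LEMMAS AND PROOFS =====

-- a first-match scan over a flat (keyword, sig, cat) list with predicate p on the keyword
def pvScan (p : String → Bool) (l : List (String × String × String)) : Option (List (String × String)) :=
  match l.find? (fun e => p e.1) with
  | some (kw, sig, cat) =>
      some [(kw, sig), ("category", cat),
            ("traditional_source", "Based on classical horary significator assignments")]
  | none => none

-- one category block: A's any+next over kws = the scan over the flattened block ++ rest
theorem pvBlock_eq (q : String) (sig cat : String) (kws : List String)
    (flat : List (String × String × String)) :
    (if kws.any (fun kw => PySem.Str.isIn kw q) then
        match kws.find? (fun kw => PySem.Str.isIn kw q) with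
        | some item_name =>
            some [(item_name, sig), ("category", cat),
                  ("traditional_source", "Based on classical horary significator assignments")]
        | none => none
      else pvScan (fun kw => PySem.Str.isIn kw q) flat)
    = pvScan (fun kw => PySem.Str.isIn kw q) (kws.map (fun kw => (kw, sig, cat)) ++ flat) := by
  induction kws with
  | nil => simp [pvScan]
  | cons k ks ih =>
      by_cases hk : PySem.Chars.isIn k.toList q.toList = true
      · simp [pvScan, hk]
      · rw [Bool.not_eq_true] at hk
        simp only [List.any_cons, List.find?_cons, List.map_cons, List.cons_append, pvScan,
          PySem.Str.isIn_eq, hk, Bool.false_or] at *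
        exact ih

-- A's category loop = the isIn-scan of the flattening
theorem pvLoop_eq (q : String) (cats : List (String × (List String × String × String))) :
    pvA_loop q cats
      = pvScan (fun kw => PySem.Str.isIn kw q)
          (cats.flatMap (fun c => c.2.1.map (fun kw => (kw, c.2.2.1, c.2.2.2)))) := by
  induction cats with
  | nil => simp [pvA_loop, pvScan]
  | cons c rest ih =>
      obtain ⟨_, kws, sig, cat⟩ := c
      simp only [pvA_loop, List.flatMap_cons]
      rw [← pvBlock_eq, ih]

-- A's table flattens to B's flat table
theorem pvFlat_eq :
    pvA_significators.flatMap (fun c => c.2.1.map (fun kw => (kw, c.2.2.1, c.2.2.2))) = pvB_table := by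
  decide

-- membership in Source B's inner fold (one text position i, all table entries)
theorem pvMem_inner (q : List Char) (i : Nat) (s : PySem.Set String) (x : String)
    (l : List (String × String × String)) :
    x ∈ l.foldl
        (fun acc e =>
          if PySem.Chars.startswith (q.drop i) e.1.toList then PySem.Set.add acc e.1 else acc)
        s
      ↔ x ∈ s ∨ ∃ e ∈ l, PySem.Chars.startswith (q.drop i) e.1.toList = true ∧ e.1 = x := by
  induction l generalizing s with
  | nil => simp
  | cons e rest ih =>
      simp only [List.foldl_cons, List.mem_cons]
      by_cases he : PySem.Chars.startswith (q.drop i) e.1.toList = true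
      · rw [if_pos he, ih]
        simp only [PySem.Set.mem_add]
        constructor
        · rintro ((h | h) | ⟨e', he', hs, hx⟩)
          · exact Or.inl h
          · exact Or.inr ⟨e, Or.inl rfl, he, h.symm⟩
          · exact Or.inr ⟨e', Or.inr he', hs, hx⟩
        · rintro (h | ⟨e', (rfl | he'), hs, hx⟩)
          · exact Or.inl (Or.inl h)
          · exact Or.inl (Or.inr hx.symm)
          · exact Or.inr ⟨e', he', hs, hx⟩
      · rw [if_neg he, ih]
        constructor
        · rintro (h | ⟨e', he', hs, hx⟩)
          · exact Or.inl h
          · exact Or.inr ⟨e', Or.inr he', hs, hx⟩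
        · rintro (h | ⟨e', (rfl | he'), hs, hx⟩)
          · exact Or.inl h
          · exact absurd hs he
          · exact Or.inr ⟨e', he', hs, hx⟩

-- membership in the whole found set
theorem pvMem_found (q : List Char) (x : String) :
    x ∈ pvB_found q
      ↔ ∃ i < q.length, ∃ e ∈ pvB_table,
          PySem.Chars.startswith (q.drop i) e.1.toList = true ∧ e.1 = x := by
  unfold pvB_found
  have main : ∀ (l : List Nat) (s : PySem.Set String),
      x ∈ l.foldl
          (fun acc i =>
            pvB_table.foldl
              (fun acc e =>
                if PySem.Chars.startswith (q.drop i) e.1.toList then PySem.Set.add acc e.1 else acc)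
              acc)
          s
        ↔ x ∈ s ∨ ∃ i ∈ l, ∃ e ∈ pvB_table,
            PySem.Chars.startswith (q.drop i) e.1.toList = true ∧ e.1 = x := by
    intro l
    induction l with
    | nil => simp
    | cons i rest ih =>
        intro s
        simp only [List.foldl_cons, List.mem_cons]
        rw [ih, pvMem_inner]
        constructor
        · rintro ((h | ⟨e, he, hs, hx⟩) | ⟨i', hi', h⟩)
          · exact Or.inl h
          · exact Or.inr ⟨i, Or.inl rfl, e, he, hs, hx⟩
          · exact Or.inr ⟨i', Or.inr hi', h⟩
        · rintro (h | ⟨i', (rfl | hi'), h⟩)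
          · exact Or.inl (Or.inl h)
          · exact Or.inl (Or.inr h)
          · exact Or.inr ⟨i', hi', h⟩
  rw [main]
  simp [List.mem_range, PySem.Set.empty]

-- all table keywords are nonempty
theorem pvKw_ne_nil : ∀ e ∈ pvB_table, e.1.toList ≠ [] := by decide

-- on table entries, membership in found = the 'kw in q' test A makes
theorem pvFound_eq_isIn (q : String) (e : String × String × String) (he : e ∈ pvB_table) :
    PySem.Set.contains (pvB_found q.toList) e.1 = PySem.Str.isIn e.1 q := by
  rcases hb : PySem.Str.isIn e.1 q with _ | _
  · -- isIn = false: e.1 occurs nowhere, so it is not in found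
    rw [Bool.eq_false_iff]
    intro hc
    rw [PySem.Set.contains_iff, pvMem_found] at hc
    obtain ⟨i, _, e', _, hs, hx⟩ := hc
    rw [hx] at hs
    have : ∃ j, e.1.toList <+: q.toList.drop j :=
      ⟨i, (PySem.Chars.startswith_iff _ _).mp hs⟩
    rw [PySem.Chars.exists_prefix_drop_iff_isIn] at this
    rw [PySem.Str.isIn_eq] at hb
    simp [this] at hb
  · -- isIn = true: some position carries e.1, and it is < length since e.1 ≠ []
    rw [PySem.Set.contains_iff, pvMem_found]
    rw [PySem.Str.isIn_eq] at hb
    rw [← PySem.Chars.exists_prefix_drop_iff_isIn] at hb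
    obtain ⟨j, hj⟩ := hb
    have hjlt : j < q.toList.length := by
      by_contra h
      rw [List.drop_eq_nil_of_le (by omega)] at hj
      exact pvKw_ne_nil e he (List.prefix_nil.mp hj)
    exact ⟨j, hjlt, e, he, (PySem.Chars.startswith_iff _ _).mpr hj, rfl⟩

-- find? with pointwise-equal predicates on the list's members
theorem pvFind?_congr {α : Type} (p₁ p₂ : α → Bool) (l : List α)
    (h : ∀ x ∈ l, p₁ x = p₂ x) : l.find? p₁ = l.find? p₂ := by
  induction l with
  | nil => rfl
  | cons a rest ih =>
      simp only [List.find?_cons, h a (List.mem_cons_self)]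
      cases p₂ a
      · exact ih fun x hx => h x (List.mem_cons_of_mem a hx)
      · rfl

-- ===== VERDICT (by name: the statement is the Claim_ definition above) =====
theorem detect_natural_significator_py_spec : Claim_equal_detect_natural_significator_py := by
  intro q _
  show detect_natural_significator_py q = detect_natural_significator_py_alt q
  rw [detect_natural_significator_py, pvLoop_eq, pvFlat_eq]
  unfold detect_natural_significator_py_alt pvScan
  rw [pvFind?_congr (fun e => PySem.Str.isIn e.1 q)
        (fun e => PySem.Set.contains (pvB_found q.toList) e.1) pvB_table
        (fun e he => (pvFound_eq_isIn q e he).symm)]
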